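-- pv_equiv track=rewrite | github.com/Alan-404/Conformer | processing/grapheme.py | split_voiceless_item
-- ===== SOURCE A (Python) =====
-- from typing import Union, Optional, List, Tuple, Dict
--
-- def split_voiceless_item(graphemes: List[str], patterns: List[str], vowels: List[str]):
--     length = len(graphemes)
--     if length == 1:
--         return [*graphemes[0]]
--
--     items = []
--     for i in range(length):
--         if graphemes[i] in patterns:
--             if i == 0 or i == length - 1:
--                 items += [*graphemes[i]]
--             else:
--                 items.append(graphemes[i])
--         else:
--             items.append(graphemes[i])
--
--     return items
-- ===== SOURCE B (Python) =====
-- def split_voiceless_item(graphemes, patterns, vowels):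
--     n = len(graphemes)
--     if n == 0:
--         return []
--     if n == 1:
--         return [*graphemes[0]]
--     first = [*graphemes[0]] if graphemes[0] in patterns else [graphemes[0]]
--     last = [*graphemes[-1]] if graphemes[-1] in patterns else [graphemes[-1]]
--     return first + graphemes[1:n - 1] + last
-- ===== Notes on version B (the rewrite author's own statement) =====
-- stated objective: faster
-- what changed: B removes A's per-element loop over all of graphemes: it expands only the two boundary elements (the only positions A ever expands) and carries the whole interior unchanged as one bulk slice graphemes[1:n-1].
import Mathlib
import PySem

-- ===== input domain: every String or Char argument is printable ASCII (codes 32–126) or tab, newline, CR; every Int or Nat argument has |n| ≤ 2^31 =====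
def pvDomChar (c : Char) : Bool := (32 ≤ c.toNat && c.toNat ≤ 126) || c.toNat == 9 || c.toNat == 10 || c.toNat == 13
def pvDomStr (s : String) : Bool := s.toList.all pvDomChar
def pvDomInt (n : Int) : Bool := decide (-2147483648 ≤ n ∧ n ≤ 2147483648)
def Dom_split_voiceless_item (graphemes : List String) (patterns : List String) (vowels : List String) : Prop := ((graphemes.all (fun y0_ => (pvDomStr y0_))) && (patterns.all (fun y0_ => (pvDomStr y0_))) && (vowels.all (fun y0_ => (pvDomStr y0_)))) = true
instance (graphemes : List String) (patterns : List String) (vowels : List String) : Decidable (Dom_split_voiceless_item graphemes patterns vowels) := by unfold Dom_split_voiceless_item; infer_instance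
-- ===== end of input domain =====

-- B drops A's per-element loop: it expands only the two boundary elements and carries the
-- interior unchanged as one bulk slice (two membership tests instead of one per element); objective: faster.

-- [*s] : the list of one-character strings of s (used by both Pythons)
def pvExpand (s : String) : List String := s.toList.map (fun c => String.ofList [c])

-- ===== PORT A =====
def split_voiceless_item (graphemes : List String) (patterns : List String) (vowels : List String) : List String :=
  let length : Int := graphemes.length
  if length = 1 then
    pvExpand (PySem.List.pyGetD graphemes 0 "")
  else
    (PySem.List.pyRange 0 length).foldl (fun items i =>
      if PySem.List.pyGetD graphemes i "" ∈ patterns then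
        if i = 0 ∨ i = length - 1 then items ++ pvExpand (PySem.List.pyGetD graphemes i "")
        else items ++ [PySem.List.pyGetD graphemes i ""]
      else items ++ [PySem.List.pyGetD graphemes i ""]) []

-- ===== PORT B =====
def split_voiceless_item_alt (graphemes : List String) (patterns : List String) (vowels : List String) : List String :=
  let n : Int := graphemes.length
  if n = 0 then []
  else if n = 1 then pvExpand (PySem.List.pyGetD graphemes 0 "")
  else
    let first := if PySem.List.pyGetD graphemes 0 "" ∈ patterns
                 then pvExpand (PySem.List.pyGetD graphemes 0 "")
                 else [PySem.List.pyGetD graphemes 0 ""]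
    let last := if PySem.List.pyGetD graphemes (-1) "" ∈ patterns
                then pvExpand (PySem.List.pyGetD graphemes (-1) "")
                else [PySem.List.pyGetD graphemes (-1) ""]
    first ++ PySem.List.slice graphemes (some 1) (some (n - 1)) ++ last

-- ===== PRECONDITION & SPEC =====
def Spec_split_voiceless_item (graphemes : List String) (patterns : List String) (vowels : List String) (out : List String) : Prop := out = split_voiceless_item_alt graphemes patterns vowels
instance (graphemes : List String) (patterns : List String) (vowels : List String) (out : List String) : Decidable (Spec_split_voiceless_item graphemes patterns vowels out) := by unfold Spec_split_voiceless_item; infer_instance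

-- ===== CLAIM (what is proved, stated in full; the proofs are below) =====
def Claim_equal_split_voiceless_item : Prop := ∀ (graphemes : List String) (patterns : List String) (vowels : List String), Dom_split_voiceless_item graphemes patterns vowels → Spec_split_voiceless_item graphemes patterns vowels (split_voiceless_item graphemes patterns vowels)

-- ===== LEMMAS AND PROOFS =====

-- graphemes[-1] on a nonempty list is its last element
theorem pyGetD_neg_one {α : Type} (l : List α) (d : α) (h : l ≠ []) :
    PySem.List.pyGetD l (-1) d = l.getD (l.length - 1) d := by
  have hn : 1 ≤ l.length := List.length_pos_iff.mpr h
  simp only [PySem.List.pyGetD, PySem.List.pyGet?, PySem.List.pyIdx?]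
  have h0 : ¬ ((0:Int) ≤ -1) := by omega
  have h1 : -(l.length : Int) ≤ -1 := by omega
  simp [h1, List.getD_eq_getElem?_getD]

-- reading the interior indices one by one yields the slice graphemes[1:n-1]
theorem map_getD_succ_range {α : Type} (l : List α) (d : α) (k : Nat) (h : k + 1 ≤ l.length) :
    (List.range k).map (fun j => l.getD (j + 1) d) = (l.drop 1).take k := by
  apply List.ext_getElem
  · simp; omega
  · intro i h1 h2
    simp only [List.length_map, List.length_range] at h1
    simp only [List.getElem_map, List.getElem_range, List.getElem_take, List.getElem_drop]
    rw [List.getD_eq_getElem?_getD, List.getElem?_eq_getElem (by omega)]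
    simp [Nat.add_comm]

theorem main_eq (graphemes patterns vowels : List String) :
    split_voiceless_item graphemes patterns vowels
      = split_voiceless_item_alt graphemes patterns vowels := by
  match graphemes with
  | [] => rfl
  | [a] => rfl
  | a :: b :: t =>
    set gs := a :: b :: t with hdef
    set k := t.length with hk
    have hlen : gs.length = k + 2 := by simp [hdef, hk]
    -- the per-index contribution of A's loop
    set F : Nat → List String := fun j =>
      if gs.getD j "" ∈ patterns then
        if j = 0 ∨ j = k + 1 then pvExpand (gs.getD j "") else [gs.getD j ""]
      else [gs.getD j ""] with hF
    have hA : split_voiceless_item gs patterns vowels = (List.range (k + 2)).flatMap F := by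
      have hne1 : ((gs.length : Int)) ≠ 1 := by rw [hlen]; push_cast; omega
      simp only [split_voiceless_item]
      rw [if_neg hne1, show (gs.length : Int) = ((k + 2 : Nat) : Int) by rw [hlen],
        PySem.List.pyRange_zero_natCast, List.foldl_map]
      rw [PySem.List.foldl_congr_mem _ _ (fun items j => items ++ F j) _ ?_]
      · rw [PySem.List.foldl_append_eq_flatMap]; simp
      · intro items j hj
        simp only [List.mem_range] at hj
        have hcond : (((j : Nat) : Int) = 0 ∨ ((j : Nat) : Int) = ((k + 2 : Nat) : Int) - 1)
            ↔ (j = 0 ∨ j = k + 1) := by omega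
        simp only [PySem.List.pyGetD_natCast, hF, hcond]
        split_ifs <;> rfl
    rw [hA]
    -- split the range at both ends
    have hsplit : (List.range (k + 2)).flatMap F
        = F 0 ++ (List.range k).flatMap (fun j => F (j + 1)) ++ F (k + 1) := by
      rw [List.range_succ, List.range_succ_eq_map]
      simp [List.flatMap_append, List.flatMap_map]
    rw [hsplit]
    -- interior contributions are singletons, i.e. the slice
    have hmid : (List.range k).flatMap (fun j => F (j + 1)) = (gs.drop 1).take k := by
      rw [List.flatMap_congr (g := fun j => [gs.getD (j + 1) ""]) ?_]
      · rw [← List.map_eq_flatMap, map_getD_succ_range gs "" k (by omega)]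
      · intro j hj
        simp only [List.mem_range] at hj
        have h0 : ¬ (j + 1 = 0 ∨ j + 1 = k + 1) := by omega
        simp only [hF, h0, if_false]
        split_ifs <;> rfl
    rw [hmid]
    -- now unfold B
    rw [split_voiceless_item_alt]
    have hne0 : ((gs.length : Int)) ≠ 0 := by rw [hlen]; push_cast; omega
    have hne1 : ((gs.length : Int)) ≠ 1 := by rw [hlen]; push_cast; omega
    simp only [hne0, hne1, if_false]
    have hslice : PySem.List.slice gs (some 1) (some ((gs.length : Int) - 1))
        = (gs.drop 1).take k := by
      rw [show ((gs.length : Int) - 1) = ((k + 1 : Nat) : Int) by rw [hlen]; push_cast; omega,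
        show ((1 : Int)) = ((1 : Nat) : Int) from rfl, PySem.List.slice_natCast]
      simp
    rw [hslice]
    have hget0 : PySem.List.pyGetD gs 0 "" = gs.getD 0 "" := by
      rw [show ((0 : Int)) = ((0 : Nat) : Int) from rfl, PySem.List.pyGetD_natCast]
    have hgetl : PySem.List.pyGetD gs (-1) "" = gs.getD (k + 1) "" := by
      rw [pyGetD_neg_one gs "" (by simp [hdef]), hlen]
      norm_num
    have hF0 : F 0 = if gs.getD 0 "" ∈ patterns then pvExpand (gs.getD 0 "") else [gs.getD 0 ""] := by
      simp [hF]
    have hFl : F (k + 1)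
        = if gs.getD (k + 1) "" ∈ patterns then pvExpand (gs.getD (k + 1) "") else [gs.getD (k + 1) ""] := by
      simp [hF]
    rw [hF0, hFl, hget0, hgetl]

-- ===== VERDICT (by name: the statement is the Claim_ definition above) =====
theorem split_voiceless_item_spec : Claim_equal_split_voiceless_item := by
  intro graphemes patterns vowels _
  unfold Spec_split_voiceless_item
  exact main_eq graphemes patterns vowels
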